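-- pv_equiv track=rewrite | github.com/DavoDC/RivalsVidMaker | src/ai_prompt.py | _ko_summary
-- ===== SOURCE A (Python) =====
-- def _ko_summary(ko_tiers: dict[str, int]) -> str:
--     """Human-readable kill-tier summary. E.g. '2x QUAD, 1x PENTA'."""
--     if not ko_tiers:
--         return "(no Quad+ kills detected)"
--     tier_order = ["HEXA", "PENTA", "QUAD", "TRIPLE", "DOUBLE", "KO"]
--     parts = []
--     for t in tier_order:
--         if t in ko_tiers:
--             parts.append(f"{ko_tiers[t]}x {t}")
--     # Any unexpected tiers not in the ordered list
--     for t, n in ko_tiers.items():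
--         if t not in tier_order:
--             parts.append(f"{n}x {t}")
--     return ", ".join(parts) if parts else "(no kills detected)"
-- ===== SOURCE B (Python) =====
-- def _ko_summary(ko_tiers: dict[str, int]) -> str:
--     """Human-readable kill-tier summary. E.g. '2x QUAD, 1x PENTA'."""
--     if not ko_tiers:
--         return "(no Quad+ kills detected)"
--     tier_order = ["HEXA", "PENTA", "QUAD", "TRIPLE", "DOUBLE", "KO"]
--     rank = {t: i for i, t in enumerate(tier_order)}
--     # one pass: drop each entry into its tier's bucket (unknown tiers last, insertion order)
--     buckets = [[] for _ in range(len(tier_order) + 1)]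
--     for t, n in ko_tiers.items():
--         buckets[rank.get(t, len(tier_order))].append(f"{n}x {t}")
--     return ", ".join(part for bucket in buckets for part in bucket)
-- ===== Notes on version B (the rewrite author's own statement) =====
-- stated objective: alternative
-- what changed: B replaces A's two passes (an ordered scan over tier_order with membership tests plus a second leftover scan over the dict) by a single pass over the dict that drops each entry into a rank-indexed bucket (bucket sort by tier rank, unknown tiers in the last bucket), then flattens the buckets.
import Mathlib
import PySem

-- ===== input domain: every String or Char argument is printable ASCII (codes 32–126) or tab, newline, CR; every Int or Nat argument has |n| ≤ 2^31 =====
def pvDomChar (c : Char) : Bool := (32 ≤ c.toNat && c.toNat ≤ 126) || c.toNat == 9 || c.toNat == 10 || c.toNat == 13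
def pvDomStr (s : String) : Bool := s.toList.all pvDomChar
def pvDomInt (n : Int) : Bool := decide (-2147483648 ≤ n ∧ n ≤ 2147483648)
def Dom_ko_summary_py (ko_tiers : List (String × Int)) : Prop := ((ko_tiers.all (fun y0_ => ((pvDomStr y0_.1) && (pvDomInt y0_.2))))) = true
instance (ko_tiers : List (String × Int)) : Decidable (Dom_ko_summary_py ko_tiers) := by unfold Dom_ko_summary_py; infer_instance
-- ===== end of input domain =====

-- B replaces A's two passes (ordered membership scan + leftover scan) by a single bucket pass; objective: alternative.


-- ===== PORT A =====
def pvTierOrder : List String := ["HEXA", "PENTA", "QUAD", "TRIPLE", "DOUBLE", "KO"]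

-- f"{n}x {t}"
def pvFmt (n : Int) (t : String) : String := PySem.Str.join "" [PySem.Int.toStr n, "x ", t]

def ko_summary_py (ko_tiers : List (String × Int)) : String :=
  if ko_tiers = [] then "(no Quad+ kills detected)"
  else
    let d := PySem.Dict.mk ko_tiers
    let parts : List String := pvTierOrder.foldl
      (fun parts t => if d.contains t then parts ++ [pvFmt ((d.get? t).getD 0) t] else parts) []
    let parts := ko_tiers.foldl
      (fun parts tn => if !(pvTierOrder.contains tn.1) then parts ++ [pvFmt tn.2 tn.1] else parts) parts
    if parts ≠ [] then PySem.Str.join ", " parts else "(no kills detected)"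

-- ===== PORT B =====
def ko_summary_py_alt (ko_tiers : List (String × Int)) : String :=
  if ko_tiers = [] then "(no Quad+ kills detected)"
  else
    let rank := PySem.Dict.ofList ((PySem.List.enumerate pvTierOrder).map (fun p => (p.2, p.1)))
    -- buckets[rank.get(t, 6)].append(...): the index is 0..6 by construction, so .toNat is exact here
    let buckets := ko_tiers.foldl
      (fun (buckets : List (List String)) tn =>
        let i := (rank.getD tn.1 6).toNat
        buckets.set i (buckets[i]! ++ [pvFmt tn.2 tn.1]))
      (List.replicate (pvTierOrder.length + 1) [])
    PySem.Str.join ", " buckets.flatten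

-- ===== PRECONDITION & SPEC =====
-- Pre_ excludes association lists with duplicate keys: the argument is a Python dict, whose
-- association-list image always has pairwise-distinct keys, so nothing A can actually be called on is excluded.
def Pre_ko_summary_py (ko_tiers : List (String × Int)) : Prop := (ko_tiers.map Prod.fst).Nodup
instance (ko_tiers : List (String × Int)) : Decidable (Pre_ko_summary_py ko_tiers) := by unfold Pre_ko_summary_py; infer_instance
def pvWitness_ko_summary_py : (List (String × Int)) := [("QUAD", 2), ("PENTA", 1), ("ULTRA", 3)]
def Spec_ko_summary_py (ko_tiers : List (String × Int)) (out : String) : Prop := out = ko_summary_py_alt ko_tiers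
instance (ko_tiers : List (String × Int)) (out : String) : Decidable (Spec_ko_summary_py ko_tiers out) := by unfold Spec_ko_summary_py; infer_instance

-- ===== CLAIM (what is proved, stated in full; the proofs are below) =====
def Claim_equal_ko_summary_py : Prop := ∀ (ko_tiers : List (String × Int)), Dom_ko_summary_py ko_tiers → Pre_ko_summary_py ko_tiers → Spec_ko_summary_py ko_tiers (ko_summary_py ko_tiers)

-- ===== LEMMAS AND PROOFS =====
def pvRankD : PySem.Dict String Int :=
  PySem.Dict.mk [("HEXA",0),("PENTA",1),("QUAD",2),("TRIPLE",3),("DOUBLE",4),("KO",5)]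

theorem pvRank_eval :
    PySem.Dict.ofList ((PySem.List.enumerate pvTierOrder).map (fun p => (p.2, p.1))) = pvRankD := by
  decide

def pvRidx (t : String) : Nat := (pvRankD.getD t 6).toNat

theorem pvRidx_eq (t : String) : pvRidx t =
    if t = "HEXA" then 0 else if t = "PENTA" then 1 else if t = "QUAD" then 2
    else if t = "TRIPLE" then 3 else if t = "DOUBLE" then 4 else if t = "KO" then 5 else 6 := by
  simp only [pvRidx, pvRankD, PySem.Dict.getD_eq_get?_getD, PySem.Dict.get?_mk_cons]
  split_ifs <;> simp_all <;> rfl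

def pvBucket (i : Nat) (l : List (String × Int)) : List String :=
  (l.filter (fun tn => pvRidx tn.1 == i)).map (fun tn => pvFmt tn.2 tn.1)

theorem pvBucket_cons (i : Nat) (tn : String × Int) (l : List (String × Int)) :
    pvBucket i (tn :: l) =
      (if pvRidx tn.1 = i then [pvFmt tn.2 tn.1] else []) ++ pvBucket i l := by
  by_cases h : pvRidx tn.1 = i <;> simp [pvBucket, h]

theorem pvBuckets_fold (l : List (String × Int)) (b0 b1 b2 b3 b4 b5 b6 : List String) :
    l.foldl (fun (buckets : List (List String)) tn =>
        buckets.set (pvRankD.getD tn.1 6).toNat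
          (buckets[(pvRankD.getD tn.1 6).toNat]! ++ [pvFmt tn.2 tn.1]))
      [b0, b1, b2, b3, b4, b5, b6]
    = [b0 ++ pvBucket 0 l, b1 ++ pvBucket 1 l, b2 ++ pvBucket 2 l, b3 ++ pvBucket 3 l,
       b4 ++ pvBucket 4 l, b5 ++ pvBucket 5 l, b6 ++ pvBucket 6 l] := by
  induction l generalizing b0 b1 b2 b3 b4 b5 b6 with
  | nil => simp [pvBucket]
  | cons tn l ih =>
    have h := pvRidx_eq tn.1
    have hfold : (pvRankD.getD tn.1 6).toNat = pvRidx tn.1 := rfl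
    simp only [List.foldl_cons, hfold, h]
    split_ifs with h1 h2 h3 h4 h5 h6 <;>
      simp_all [List.set, pvBucket_cons, List.getElem!_eq_getElem?_getD, List.append_assoc]

-- filter by a fixed key under Nodup keys = singleton from first-match lookup
theorem pvFilter_key (l : List (String × Int)) (h : (l.map Prod.fst).Nodup) (T : String) :
    l.filter (fun tn => tn.1 == T) =
      (match (PySem.Dict.mk l).get? T with
       | some v => [(T, v)]
       | none   => ([] : List (String × Int))) := by
  induction l with
  | nil => rfl
  | cons tn l ih =>
    obtain ⟨k, v⟩ := tn
    simp only [List.map_cons, List.nodup_cons] at h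
    rw [List.filter_cons]
    by_cases hk : k = T
    · subst hk
      have hnone : l.filter (fun tn' => tn'.1 == k) = [] := by
        rw [List.filter_eq_nil_iff]
        intro x hx
        simp only [beq_iff_eq]
        intro hfst
        exact h.1 (hfst ▸ List.mem_map_of_mem hx)
      simp [PySem.Dict.get?_mk_cons, hnone]
    · simp [PySem.Dict.get?_mk_cons, hk, ih h.2]

theorem pvContains_iff (t : String) : pvTierOrder.contains t = true ↔ pvRidx t ≠ 6 := by
  rw [pvRidx_eq]
  simp only [pvTierOrder, List.contains_eq_mem, List.mem_cons, List.not_mem_nil, or_false,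
    decide_eq_true_eq]
  split_ifs with h1 h2 h3 h4 h5 h6 <;> simp_all

theorem pvBucket6 (l : List (String × Int)) :
    pvBucket 6 l =
      (l.filter (fun tn => !(pvTierOrder.contains tn.1))).map (fun tn => pvFmt tn.2 tn.1) := by
  unfold pvBucket
  congr 1
  apply List.filter_congr
  intro tn _
  by_cases h : pvRidx tn.1 = 6
  · have hc : pvTierOrder.contains tn.1 = false := by
      by_contra hcc
      exact (pvContains_iff tn.1).mp (by simpa using hcc) h
    rw [h, hc]
    simp
  · have hc := (pvContains_iff tn.1).mpr h
    rw [hc]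
    simp [h]

theorem pvBucket_known (l : List (String × Int)) (h : (l.map Prod.fst).Nodup)
    (i : Nat) (T : String)
    (hridx : ∀ t : String, pvRidx t = i ↔ t = T) :
    pvBucket i l =
      (if (PySem.Dict.mk l).contains T = true
       then [pvFmt (((PySem.Dict.mk l).get? T).getD 0) T] else []) := by
  unfold pvBucket
  have hfe : l.filter (fun tn => pvRidx tn.1 == i) = l.filter (fun tn => tn.1 == T) := by
    apply List.filter_congr; intro tn _
    simp [hridx tn.1]
  rw [hfe, pvFilter_key l h T, PySem.Dict.contains_eq_isSome_get?]
  cases (PySem.Dict.mk l).get? T <;> simp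

theorem pvRidx_known (t : String) :
    (pvRidx t = 0 ↔ t = "HEXA") ∧ (pvRidx t = 1 ↔ t = "PENTA") ∧ (pvRidx t = 2 ↔ t = "QUAD")
    ∧ (pvRidx t = 3 ↔ t = "TRIPLE") ∧ (pvRidx t = 4 ↔ t = "DOUBLE") ∧ (pvRidx t = 5 ↔ t = "KO") := by
  rw [pvRidx_eq]
  split_ifs <;> simp_all

theorem ite_append_push {c : Prop} [Decidable c] (p : List String) (x : String) :
    (if c then p ++ [x] else p) = p ++ (if c then [x] else []) := by
  split_ifs <;> simp

theorem ko_summary_py_spec : Claim_equal_ko_summary_py := by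
  intro l _ hpre
  unfold Spec_ko_summary_py ko_summary_py ko_summary_py_alt
  by_cases hnil : l = []
  · simp [hnil]
  · simp only [if_neg hnil, pvRank_eval,
      show List.replicate (pvTierOrder.length + 1) ([] : List String) = [[],[],[],[],[],[],[]] from rfl]
    rw [pvBuckets_fold l [] [] [] [] [] [] []]
    simp only [List.nil_append, List.flatten]
    -- A side: unfold the literal 6-step fold, push the appends out of the ifs
    rw [PySem.List.foldl_append_if]
    simp only [pvTierOrder, List.foldl_cons, List.foldl_nil, ite_append_push, List.nil_append]
    rw [show (List.filter
            (fun tn => !((["HEXA", "PENTA", "QUAD", "TRIPLE", "DOUBLE", "KO"] : List String).contains tn.1))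
            l).map (fun tn => pvFmt tn.2 tn.1) = pvBucket 6 l from (pvBucket6 l).symm]
    rw [
        ← pvBucket_known l hpre 0 "HEXA" (fun t => (pvRidx_known t).1),
        ← pvBucket_known l hpre 1 "PENTA" (fun t => (pvRidx_known t).2.1),
        ← pvBucket_known l hpre 2 "QUAD" (fun t => (pvRidx_known t).2.2.1),
        ← pvBucket_known l hpre 3 "TRIPLE" (fun t => (pvRidx_known t).2.2.2.1),
        ← pvBucket_known l hpre 4 "DOUBLE" (fun t => (pvRidx_known t).2.2.2.2.1),
        ← pvBucket_known l hpre 5 "KO" (fun t => (pvRidx_known t).2.2.2.2.2)]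
    have hne : pvBucket 0 l ++ (pvBucket 1 l ++ (pvBucket 2 l ++ (pvBucket 3 l ++
        (pvBucket 4 l ++ (pvBucket 5 l ++ pvBucket 6 l))))) ≠ [] := by
      obtain ⟨tn, l', rfl⟩ := List.exists_cons_of_ne_nil hnil
      have hmem : pvFmt tn.2 tn.1 ∈ pvBucket (pvRidx tn.1) (tn :: l') := by
        rw [pvBucket_cons]; simp
      have h6 : pvRidx tn.1 ≤ 6 := by rw [pvRidx_eq]; split_ifs <;> omega
      set i := pvRidx tn.1 with hi
      intro hzero
      simp only [List.append_eq_nil_iff] at hzero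
      interval_cases i <;> simp_all
    simp only [List.append_assoc]
    rw [if_pos hne]
    simp
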